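-- pv_equiv track=rewrite | github.com/denisaiacob/Python_2022-2023 | Laborator 3/ex6.py | number_of_elements
-- ===== SOURCE A (Python) =====
-- def number_of_elements(elementsList):
--     dictionary = dict()
--     for i in elementsList:
--         if dictionary.get(i, -1) == -1:
--             dictionary.setdefault(i, 1)
--         else:
--             dictionary.update({i: dictionary[i] + 1})
--     duplicate=0
--     unique=0
--     for i in dictionary:
--         if dictionary.get(i)>1:
--             duplicate=duplicate+1
--         else:
--             unique=unique+1
--     return (unique,duplicate)
-- ===== SOURCE B (Python) =====
-- def number_of_elements(elementsList):
--     seen = set()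
--     duplicated = set()
--     for x in elementsList:
--         if x in seen:
--             duplicated.add(x)
--         else:
--             seen.add(x)
--     return (len(seen) - len(duplicated), len(duplicated))
-- ===== Notes on version B (the rewrite author's own statement) =====
-- stated objective: simpler
-- what changed: B replaces A's frequency-count dictionary plus a second categorising pass over the keys by a single pass maintaining two sets (seen and duplicated), returning (len(seen)-len(duplicated), len(duplicated)).
import Mathlib
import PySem

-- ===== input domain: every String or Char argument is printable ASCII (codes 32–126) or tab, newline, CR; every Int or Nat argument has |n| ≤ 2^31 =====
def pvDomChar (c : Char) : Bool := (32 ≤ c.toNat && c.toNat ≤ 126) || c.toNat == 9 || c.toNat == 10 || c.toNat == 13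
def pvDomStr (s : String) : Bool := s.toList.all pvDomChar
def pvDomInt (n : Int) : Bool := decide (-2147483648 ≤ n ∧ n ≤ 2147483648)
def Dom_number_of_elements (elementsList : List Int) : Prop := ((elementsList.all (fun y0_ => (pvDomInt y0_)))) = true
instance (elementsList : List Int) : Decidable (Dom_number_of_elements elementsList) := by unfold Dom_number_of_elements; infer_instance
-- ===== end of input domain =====

-- B replaces A's count-dictionary plus second categorising pass over the keys by a
-- single pass maintaining two sets (seen / duplicated); objective: simpler. A is total.

-- ===== PORT A =====
-- first loop of A: build the count dictionary (the sentinel -1 never collides with a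
-- stored count, which is always ≥ 1).  'dictionary[i]' in the else branch is ported
-- as 'getD … 0': the branch condition guarantees the key is present, so this is exact.
def pvBuildDict (elementsList : List Int) : PySem.Dict Int Int :=
  elementsList.foldl (fun dictionary i =>
    if PySem.Dict.getD dictionary i (-1) == -1 then
      PySem.Dict.setdefault dictionary i 1
    else
      PySem.Dict.update dictionary [(i, PySem.Dict.getD dictionary i 0 + 1)])
    PySem.Dict.empty

def number_of_elements (elementsList : List Int) : Int × Int :=
  let dictionary := pvBuildDict elementsList
  -- second loop of A: 'for i in dictionary' iterates the keys in insertion order;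
  -- 'dictionary.get(i)' always finds the key here, ported as 'getD … 0' (exact);
  -- the accumulator pair carries (duplicate, unique) in A's declaration order
  let r := (PySem.Dict.keys dictionary).foldl
    (fun (p : Int × Int) i =>
      if PySem.Dict.getD dictionary i 0 > 1 then (p.1 + 1, p.2) else (p.1, p.2 + 1))
    (0, 0)
  (r.2, r.1)

-- ===== PORT B =====
def number_of_elements_alt (elementsList : List Int) : Int × Int :=
  let p := elementsList.foldl
    (fun (p : PySem.Set Int × PySem.Set Int) x =>
      if PySem.Set.contains p.1 x then (p.1, PySem.Set.add p.2 x)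
      else (PySem.Set.add p.1 x, p.2))
    (PySem.Set.empty, PySem.Set.empty)
  (PySem.Set.len p.1 - PySem.Set.len p.2, PySem.Set.len p.2)

-- ===== PRECONDITION & SPEC =====
def Spec_number_of_elements (elementsList : List Int) (out : Int × Int) : Prop := out = number_of_elements_alt elementsList
instance (elementsList : List Int) (out : Int × Int) : Decidable (Spec_number_of_elements elementsList out) := by unfold Spec_number_of_elements; infer_instance

-- ===== CLAIM (what is proved, stated in full; the proofs are below) =====
def Claim_equal_number_of_elements : Prop := ∀ (elementsList : List Int), Dom_number_of_elements elementsList → Spec_number_of_elements elementsList (number_of_elements elementsList)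

-- ===== LEMMAS AND PROOFS =====

-- one step of A's first loop, peeled off the right end of the list
theorem pvBuildDict_append_singleton (l : List Int) (x : Int) :
    pvBuildDict (l ++ [x]) =
      (if PySem.Dict.getD (pvBuildDict l) x (-1) == -1 then
        PySem.Dict.setdefault (pvBuildDict l) x 1
      else
        PySem.Dict.update (pvBuildDict l) [(x, PySem.Dict.getD (pvBuildDict l) x 0 + 1)]) := by
  simp [pvBuildDict, List.foldl_append]

theorem pvDict_getD_eq (d : PySem.Dict Int Int) (k d0 : Int) :
    d.getD k d0 = (d.get? k).getD d0 := by
  simp [PySem.Dict.getD]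

theorem pvDict_update_singleton (d : PySem.Dict Int Int) (a b : Int) :
    d.update [(a, b)] = d.insert a b := by
  simp [PySem.Dict.update]

-- characterisation of A's dictionary: get? is the positive count (none when absent)
theorem pvBuildDict_get? (l : List Int) :
    ∀ k, (pvBuildDict l).get? k = if l.count k = 0 then none else some (l.count k : Int) := by
  induction l using List.reverseRecOn with
  | nil => intro k; simp [pvBuildDict, PySem.Dict.get?_empty]
  | append_singleton l x ih =>
    intro k
    rw [pvBuildDict_append_singleton]
    by_cases hx : l.count x = 0
    · -- x fresh: the sentinel branch fires, setdefault inserts 1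
      have hcond : (pvBuildDict l).getD x (-1) = -1 := by
        rw [pvDict_getD_eq, ih x]; simp [hx]
      have hnc : (pvBuildDict l).contains x = false := by
        rw [PySem.Dict.contains_eq_isSome_get?, ih x]; simp [hx]
      rw [hcond, if_pos (by simp), PySem.Dict.setdefault_of_not_contains _ _ hnc]
      by_cases hk : k = x
      · subst hk
        simp [PySem.Dict.get?_insert_self, List.count_append, hx]
      · rw [PySem.Dict.get?_insert_of_ne _ _ hk, ih k]
        have hxk : ¬ x = k := fun h => hk h.symm
        simp [List.count_append, hxk]
    · -- x already counted: the update overwrites with count + 1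
      have hcond : (pvBuildDict l).getD x (-1) = (l.count x : Int) := by
        rw [pvDict_getD_eq, ih x]; simp [hx]
      have hg0 : (pvBuildDict l).getD x 0 = (l.count x : Int) := by
        rw [pvDict_getD_eq, ih x]; simp [hx]
      rw [hcond, if_neg (by simp), hg0, pvDict_update_singleton]
      by_cases hk : k = x
      · subst hk
        simp [PySem.Dict.get?_insert_self, List.count_append]
      · rw [PySem.Dict.get?_insert_of_ne _ _ hk, ih k]
        have hxk : ¬ x = k := fun h => hk h.symm
        simp [List.count_append, hxk]

theorem pvBuildDict_getD (l : List Int) (k : Int) :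
    (pvBuildDict l).getD k 0 = (l.count k : Int) := by
  rw [pvDict_getD_eq, pvBuildDict_get? l k]
  by_cases h : l.count k = 0 <;> simp [h]

theorem pvBuildDict_mem_keys (l : List Int) (k : Int) :
    k ∈ (pvBuildDict l).keys ↔ k ∈ l := by
  rw [← not_iff_not, ← PySem.Dict.get?_eq_none_iff_not_mem_keys, pvBuildDict_get? l k]
  by_cases h : l.count k = 0
  · rw [if_pos h]
    simpa using List.count_eq_zero.1 h
  · rw [if_neg h]
    simp only [reduceCtorEq, false_iff, not_not]
    exact List.count_pos_iff.1 (by omega)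

-- the keys of A's dictionary are exactly set(l) in first-occurrence order
theorem pvBuildDict_keys (l : List Int) : (pvBuildDict l).keys = PySem.Set.ofList l := by
  induction l using List.reverseRecOn with
  | nil => rfl
  | append_singleton l x ih =>
    rw [pvBuildDict_append_singleton, PySem.Set.ofList_append_singleton, ← ih]
    by_cases h : l.count x = 0
    · have hcond : (pvBuildDict l).getD x (-1) = -1 := by
        rw [pvDict_getD_eq, pvBuildDict_get? l x]; simp [h]
      have hnc : (pvBuildDict l).contains x = false := by
        rw [PySem.Dict.contains_eq_isSome_get?, pvBuildDict_get? l x]; simp [h]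
      rw [hcond, if_pos (by simp), PySem.Dict.keys_setdefault]
      have hnm : x ∉ (pvBuildDict l).keys := by
        rw [pvBuildDict_mem_keys l x]
        exact List.count_eq_zero.1 h
      rw [PySem.Set.add_of_not_mem hnm]
      simp [hnc]
    · have hcond : (pvBuildDict l).getD x (-1) = (l.count x : Int) := by
        rw [pvDict_getD_eq, pvBuildDict_get? l x]; simp [h]
      have hcx : (pvBuildDict l).contains x = true := by
        rw [PySem.Dict.contains_eq_isSome_get?, pvBuildDict_get? l x]; simp [h]
      rw [hcond, if_neg (by simp), pvDict_update_singleton,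
        PySem.Dict.keys_insert_of_contains _ _ hcx]
      rw [PySem.Set.add_of_mem ((pvBuildDict_mem_keys l x).2 (List.count_pos_iff.1 (by omega)))]

-- A's second loop, over any key list, with a general accumulator
theorem pvCountLoop (cond : Int → Bool) (ks : List Int) :
    ∀ (p : Int × Int),
      ks.foldl (fun (p : Int × Int) i =>
        if cond i then (p.1 + 1, p.2) else (p.1, p.2 + 1)) p
      = (p.1 + (ks.countP cond : Int),
         p.2 + (ks.countP (fun i => decide ¬cond i = true) : Int)) := by
  induction ks with
  | nil => intro p; simp
  | cons a ks ih =>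
    intro p
    by_cases h : cond a <;>
      · simp [List.foldl_cons, h, ih]
        omega

-- invariant of B's single pass: 'seen' is set(prefix) and 'duplicated' holds exactly
-- the elements occurring at least twice in the prefix, without duplicates
theorem pvAltInv (l : List Int) :
    (l.foldl
      (fun (p : PySem.Set Int × PySem.Set Int) x =>
        if PySem.Set.contains p.1 x then (p.1, PySem.Set.add p.2 x)
        else (PySem.Set.add p.1 x, p.2))
      (PySem.Set.empty, PySem.Set.empty)).1 = PySem.Set.ofList l
    ∧ (l.foldl
      (fun (p : PySem.Set Int × PySem.Set Int) x =>
        if PySem.Set.contains p.1 x then (p.1, PySem.Set.add p.2 x)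
        else (PySem.Set.add p.1 x, p.2))
      (PySem.Set.empty, PySem.Set.empty)).2.Nodup
    ∧ ∀ y, (y ∈ (l.foldl
      (fun (p : PySem.Set Int × PySem.Set Int) x =>
        if PySem.Set.contains p.1 x then (p.1, PySem.Set.add p.2 x)
        else (PySem.Set.add p.1 x, p.2))
      (PySem.Set.empty, PySem.Set.empty)).2 ↔ 2 ≤ l.count y) := by
  induction l using List.reverseRecOn with
  | nil =>
    refine ⟨rfl, List.nodup_nil, ?_⟩
    intro y; simp [PySem.Set.empty]
  | append_singleton l x ih =>
    obtain ⟨h1, h2, h3⟩ := ih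
    rw [List.foldl_append] at *
    simp only [List.foldl_cons, List.foldl_nil]
    by_cases hx : x ∈ l
    · have hc : PySem.Set.contains (l.foldl
          (fun (p : PySem.Set Int × PySem.Set Int) x =>
            if PySem.Set.contains p.1 x then (p.1, PySem.Set.add p.2 x)
            else (PySem.Set.add p.1 x, p.2))
          (PySem.Set.empty, PySem.Set.empty)).1 x = true := by
        rw [PySem.Set.contains_iff, h1, PySem.Set.mem_ofList]; exact hx
      simp only [hc, if_pos]
      refine ⟨?_, PySem.Set.nodup_add _ _ h2, ?_⟩
      · rw [h1, PySem.Set.ofList_append_singleton,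
          PySem.Set.add_of_mem ((PySem.Set.mem_ofList l x).2 hx)]
      · intro y
        rw [PySem.Set.mem_add]
        simp only [List.count_append, List.count_singleton]
        constructor
        · rintro (hy | rfl)
          · have := (h3 y).1 hy; omega
          · have : 0 < l.count y := List.count_pos_iff.2 hx
            simp; omega
        · intro hy
          by_cases hyx : y = x
          · right; exact hyx
          · left
            refine (h3 y).2 ?_
            have hxy : ¬ x = y := fun h => hyx h.symm
            simp [hxy] at hy; omega
    · have hc : PySem.Set.contains (l.foldl
          (fun (p : PySem.Set Int × PySem.Set Int) x =>
            if PySem.Set.contains p.1 x then (p.1, PySem.Set.add p.2 x)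
            else (PySem.Set.add p.1 x, p.2))
          (PySem.Set.empty, PySem.Set.empty)).1 x = false := by
        rw [← Bool.not_eq_true, PySem.Set.contains_iff, h1, PySem.Set.mem_ofList]
        exact hx
      simp only [hc, Bool.false_eq_true, if_false]
      refine ⟨by rw [h1, PySem.Set.ofList_append_singleton], h2, ?_⟩
      intro y
      rw [h3 y]
      simp only [List.count_append, List.count_singleton]
      by_cases hyx : y = x
      · subst hyx
        have h0 : l.count y = 0 := List.count_eq_zero.2 hx
        simp [h0]
      · have hxy : ¬ x = y := fun h => hyx h.symm
        simp [hxy]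

-- ===== VERDICT (by name: the statement is the Claim_ definition above) =====
theorem number_of_elements_spec : Claim_equal_number_of_elements := by
  intro l _
  simp only [Spec_number_of_elements, number_of_elements, number_of_elements_alt]
  obtain ⟨h1, h2, h3⟩ := pvAltInv l
  set F := (fun (p : PySem.Set Int × PySem.Set Int) x =>
        if PySem.Set.contains p.1 x then (p.1, PySem.Set.add p.2 x)
        else (PySem.Set.add p.1 x, p.2)) with hF
  set cond : Int → Bool := fun i => decide ((l.count i : Int) > 1) with hcond
  -- A's second loop counts, over the keys (= set(l)), the duplicated and unique keys
  have hloop : (PySem.Dict.keys (pvBuildDict l)).foldl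
      (fun (p : Int × Int) i =>
        if PySem.Dict.getD (pvBuildDict l) i 0 > 1 then (p.1 + 1, p.2) else (p.1, p.2 + 1))
      (0, 0) = ((List.countP cond (PySem.Set.ofList l) : Int),
        (List.countP (fun i => decide ¬cond i = true) (PySem.Set.ofList l) : Int)) := by
    have hstep : ∀ (p : Int × Int) i,
        (if PySem.Dict.getD (pvBuildDict l) i 0 > 1 then (p.1 + 1, p.2) else (p.1, p.2 + 1))
        = (if cond i then (p.1 + 1, p.2) else (p.1, p.2 + 1)) := by
      intro p i; rw [pvBuildDict_getD, hcond]; simp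
    rw [PySem.List.foldl_congr_mem _ _ _ _ (by intro p i _; exact hstep p i),
      pvCountLoop cond (PySem.Dict.keys (pvBuildDict l)) (0, 0), pvBuildDict_keys l]
    simp
  rw [hloop]
  -- B's duplicated set is a permutation of the duplicated part of set(l)
  have hperm : ((l.foldl F (PySem.Set.empty, PySem.Set.empty)).2).Perm
      ((PySem.Set.ofList l).filter cond) := by
    rw [List.perm_ext_iff_of_nodup h2 (List.Nodup.filter _ (PySem.Set.nodup_ofList l))]
    intro y
    rw [h3 y, List.mem_filter, PySem.Set.mem_ofList, hcond]
    constructor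
    · intro hy
      have hmem : y ∈ l := List.count_pos_iff.1 (by omega)
      simp [hmem]; omega
    · rintro ⟨-, hy⟩; simp at hy; omega
  have hdlen : PySem.Set.len (l.foldl F (PySem.Set.empty, PySem.Set.empty)).2
      = (List.countP cond (PySem.Set.ofList l) : Int) := by
    rw [List.countP_eq_length_filter, ← hperm.length_eq]
    simp [PySem.Set.len]
  have hslen : PySem.Set.len (l.foldl F (PySem.Set.empty, PySem.Set.empty)).1
      = ((PySem.Set.ofList l).length : Int) := by
    rw [h1]; simp [PySem.Set.len]
  have hsplit := List.length_eq_countP_add_countP cond (l := PySem.Set.ofList l)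
  rw [Prod.mk.injEq]
  constructor
  · rw [hdlen, hslen]; omega
  · rw [hdlen]
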